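-- pv_equiv track=rewrite | github.com/a2n-s/tetris-couleur | tetris_couleur.py | tassementGrille
-- ===== SOURCE A (Python) =====
-- VIDE          = "VIDE"
--
-- def tassementGrille(grille) -> bool:
--     tasse = False
--     largeur = len(grille)
--
--     def descenteColonne(grille : list, x : int) -> bool:
--         hauteur = len(grille[0])
--         tasse_ = False
--         for y in range(1, hauteur):
--             if grille[x][y] is not VIDE:
--                 delta = 0
--                 y_ = y - 1
--                 while y_ >= 0 and grille[x][y_] == VIDE:
--                     y_ -= 1
--                     delta += 1
--                 grille[x][y - delta] = grille[x][y]
--                 if delta > 0: tasse_ = True; grille[x][y] = VIDE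
--         return tasse_
--
--     for x in range(largeur):
--         if descenteColonne(grille, x): tasse = True
--     return tasse
-- ===== SOURCE B (Python) =====
-- VIDE          = "VIDE"
--
-- def tassementGrille(grille) -> bool:
--     tasse = False
--     for x in range(len(grille)):
--         hauteur = len(grille[0])
--         old = grille[x][:hauteur]
--         pieces = [v for v in old if v != VIDE]
--         newcol = pieces + [VIDE] * (hauteur - len(pieces))
--         if newcol != old:
--             tasse = True
--         grille[x][:hauteur] = newcol
--     return tasse
-- ===== Notes on version B (the rewrite author's own statement) =====
-- stated objective: simpler
-- what changed: A drops each cell individually with a nested while-loop scanning for the first gap below; B rebuilds each column in one pass as (non-VIDE cells) + VIDE padding and flags a change by comparing with the old column.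
-- outside the precondition, e.g. on tassementGrille([['Y'], []]): A returns False, B returns True
import Mathlib
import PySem

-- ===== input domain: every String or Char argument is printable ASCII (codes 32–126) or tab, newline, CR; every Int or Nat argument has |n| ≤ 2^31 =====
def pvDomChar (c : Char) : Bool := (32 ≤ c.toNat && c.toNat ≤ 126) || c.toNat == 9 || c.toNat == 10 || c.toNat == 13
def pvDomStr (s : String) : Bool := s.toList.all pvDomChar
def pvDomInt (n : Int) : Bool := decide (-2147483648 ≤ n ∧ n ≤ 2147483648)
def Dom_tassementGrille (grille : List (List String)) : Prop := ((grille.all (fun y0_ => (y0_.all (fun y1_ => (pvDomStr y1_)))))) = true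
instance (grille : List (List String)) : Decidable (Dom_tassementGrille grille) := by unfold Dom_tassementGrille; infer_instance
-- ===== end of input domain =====

-- B replaces A's per-cell shifting (inner while-loop) by rebuilding each column as
-- filter-out-VIDE + pad; objective: simpler. Both Pythons mutate `grille` in place with the
-- same final state on Pre_; the theorems below are about the return value.
-- Python `x is not VIDE` / `x == VIDE` are ported as (in)equality with "VIDE" (exact for the
-- interned module constant).

-- ===== PORT A =====
-- the while-loop `while y_ >= 0 and grille[x][y_] == VIDE: y_ -= 1; delta += 1`,
-- called with y_ = n - 1 (argument n = y_ + 1; n = 0 means y_ < 0); returns delta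
def pvDeltaA (col : List String) : Nat → Nat
  | 0 => 0
  | n+1 => if col.getD n "" = "VIDE" then pvDeltaA col n + 1 else 0

-- body of A's `for y in range(1, hauteur)` loop, state = (column, tasse_)
def pvStepA (st : List String × Bool) (y : Nat) : List String × Bool :=
  if st.1.getD y "" ≠ "VIDE" then
    let delta := pvDeltaA st.1 y
    let col1 := st.1.set (y - delta) (st.1.getD y "")
    if delta > 0 then (col1.set y "VIDE", true) else (col1, st.2)
  else st

-- A's nested `descenteColonne` (the column is passed directly instead of (grille, x))
def pvDescCol (col : List String) (hauteur : Nat) : List String × Bool :=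
  (List.range' 1 (hauteur - 1)).foldl pvStepA (col, false)

def pvStepGA (st : List (List String) × Bool) (x : Nat) : List (List String) × Bool :=
  let r := pvDescCol (st.1.getD x []) ((st.1.getD 0 []).length)
  (st.1.set x r.1, if r.2 then true else st.2)

def tassementGrille (grille : List (List String)) : Bool :=
  ((List.range grille.length).foldl pvStepGA (grille, false)).2

-- ===== PORT B =====
-- body of B's single `for x in range(len(grille))` loop
def pvStepGB (st : List (List String) × Bool) (x : Nat) : List (List String) × Bool :=
  let hauteur := (st.1.getD 0 []).length
  let col := st.1.getD x []
  let old := col.take hauteur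
  let pieces := old.filter (fun v => decide (v ≠ "VIDE"))
  let newcol := pieces ++ List.replicate (hauteur - pieces.length) "VIDE"
  (st.1.set x (newcol ++ col.drop hauteur), if newcol ≠ old then true else st.2)

def tassementGrille_alt (grille : List (List String)) : Bool :=
  ((List.range grille.length).foldl pvStepGB (grille, false)).2

-- ===== PRECONDITION & SPEC =====
-- Pre_ excludes ragged grids (a column strictly shorter than column 0): A raises IndexError
-- on them except in the degenerate hauteur ≤ 1 case, where which columns get compacted/padded
-- is an accident of reading the grid height from column 0 and neither behaviour is specified.
def Pre_tassementGrille (grille : List (List String)) : Prop :=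
  ∀ col ∈ grille, (grille.getD 0 []).length ≤ col.length
instance (grille : List (List String)) : Decidable (Pre_tassementGrille grille) := by
  unfold Pre_tassementGrille; infer_instance

def pvWitness_tassementGrille : List (List String) :=
  [["X", "VIDE", "Y"], ["VIDE", "X", "VIDE"]]

def Spec_tassementGrille (grille : List (List String)) (out : Bool) : Prop := out = tassementGrille_alt grille
instance (grille : List (List String)) (out : Bool) : Decidable (Spec_tassementGrille grille out) := by unfold Spec_tassementGrille; infer_instance

-- ===== CLAIM (what is proved, stated in full; the proofs are below) =====
def Claim_equal_tassementGrille : Prop := ∀ (grille : List (List String)), Dom_tassementGrille grille → Pre_tassementGrille grille → Spec_tassementGrille grille (tassementGrille grille)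

-- ===== LEMMAS AND PROOFS =====

-- the compacted form of a column prefix: pieces first, then VIDE padding
def pvCompact (l : List String) : List String :=
  l.filter (fun v => decide (v ≠ "VIDE")) ++
    List.replicate (l.length - (l.filter (fun v => decide (v ≠ "VIDE"))).length) "VIDE"

theorem pvCompact_length (l : List String) : (pvCompact l).length = l.length := by
  unfold pvCompact
  rw [List.length_append, List.length_replicate]
  have := List.length_filter_le (fun v => decide (v ≠ "VIDE")) l
  omega

theorem pv_getD_append_add (l₁ l₂ : List String) (k : Nat) (d : String) :
    (l₁ ++ l₂).getD (l₁.length + k) d = l₂.getD k d := by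
  induction l₁ with
  | nil => simp
  | cons a l ih => simpa [Nat.succ_add] using ih

theorem pv_getD_append_lt (l₁ l₂ : List String) (i : Nat) (h : i < l₁.length) (d : String) :
    (l₁ ++ l₂).getD i d = l₁.getD i d := by
  induction l₁ generalizing i with
  | nil => simp at h
  | cons a l ih =>
    cases i with
    | zero => simp
    | succ n => simpa using ih n (by simpa using h)

theorem pv_set_append_length (l₁ l₂ : List String) (a : String) :
    (l₁ ++ l₂).set l₁.length a = l₁ ++ l₂.set 0 a := by
  induction l₁ with
  | nil => simp
  | cons b l ih => simp [ih]

-- the while-loop result: on a column shaped pieces ++ VIDE-padding ++ rest,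
-- started at index p.length + k with k ≤ m, it counts k
theorem pvDeltaA_spec (p R : List String) (m k : Nat) (hk : k ≤ m)
    (hp : ∀ v ∈ p, v ≠ "VIDE") :
    pvDeltaA (p ++ List.replicate m "VIDE" ++ R) (p.length + k) = k := by
  induction k with
  | zero =>
    rcases p with _ | ⟨a, l⟩
    · simp [pvDeltaA]
    · have hlen : (a :: l).length + 0 = l.length + 1 := by simp
      rw [hlen]
      unfold pvDeltaA
      have hlt : l.length < (a :: l).length := by simp
      have hget : ((a :: l) ++ (List.replicate m "VIDE" ++ R)).getD l.length ""
          = (a :: l).getD l.length "" := pv_getD_append_lt _ _ _ hlt _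
      have hmem : (a :: l).getD l.length "" ∈ (a :: l) := by
        rw [List.getD_eq_getElem _ _ hlt]; exact List.getElem_mem hlt
      have hne : (a :: l).getD l.length "" ≠ "VIDE" := hp _ hmem
      simp only [List.append_assoc] at *
      rw [hget, if_neg hne]
  | succ n ih =>
    have h1 : p.length + (n + 1) = (p.length + n) + 1 := by omega
    rw [h1]
    unfold pvDeltaA
    have hget : (p ++ (List.replicate m "VIDE" ++ R)).getD (p.length + n) "" = "VIDE" := by
      rw [pv_getD_append_add]
      rw [pv_getD_append_lt _ _ n (by simp; omega)]
      simp [List.getD_eq_getElem?_getD, Nat.lt_of_lt_of_le (Nat.lt_succ_self n) hk]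
    simp only [List.append_assoc] at *
    rw [hget, if_pos rfl, ih (by omega)]

-- the inner loop invariant: after processing y = 1..n the first n+1 cells are compacted,
-- the rest untouched, and the flag says whether that changed anything
theorem pvInner (col : List String) (n : Nat) (h : n < col.length) :
    (List.range' 1 n).foldl pvStepA (col, false)
      = (pvCompact (col.take (n+1)) ++ col.drop (n+1),
         decide (pvCompact (col.take (n+1)) ≠ col.take (n+1))) := by
  induction n with
  | zero =>
    rcases col with _ | ⟨c, rest⟩
    · simp at h
    · by_cases hc : c = "VIDE" <;> simp [pvCompact, hc]
  | succ n ih =>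
    have hn : n < col.length := by omega
    rw [List.range'_concat, List.foldl_append, ih hn]
    set q := col.take (n+1) with hqdef
    set f := q.filter (fun v => decide (v ≠ "VIDE")) with hfdef
    have hq : q.length = n + 1 := by
      rw [hqdef, List.length_take]; omega
    have hfle : f.length ≤ n + 1 := by
      have h2 := List.length_filter_le (fun v => decide (v ≠ "VIDE")) q
      rw [← hfdef] at h2; omega
    obtain ⟨m, hmdef⟩ : ∃ m, n + 1 - f.length = m := ⟨_, rfl⟩
    have hLlen : (f ++ List.replicate m "VIDE").length = n + 1 := by
      simp; omega
    have hv : n + 1 < col.length := h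
    set v := col[n+1] with hvdef
    have hdrop : col.drop (n+1) = v :: col.drop (n+2) := List.drop_eq_getElem_cons hv
    have htake : col.take (n+2) = q ++ [v] := by
      rw [List.take_add_one, List.getElem?_eq_getElem hv]; rfl
    have hcomp : pvCompact q ++ col.drop (n+1)
        = (f ++ List.replicate m "VIDE") ++ (v :: col.drop (n+2)) := by
      rw [pvCompact, ← hfdef, hdrop, hq, hmdef]
    have hpf : ∀ w ∈ f, w ≠ "VIDE" := by
      intro w hw
      have := List.of_mem_filter hw
      simpa using this
    have hgv : ((f ++ List.replicate m "VIDE") ++ (v :: col.drop (n+2))).getD (n+1) "" = v := by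
      have h0 : n + 1 = (f ++ List.replicate m "VIDE").length + 0 := by omega
      rw [h0, pv_getD_append_add]; rfl
    have hfq' : (q ++ [v]).filter (fun w => decide (w ≠ "VIDE"))
        = f ++ [v].filter (fun w => decide (w ≠ "VIDE")) := by
      rw [List.filter_append]
    rw [hcomp]
    simp only [List.foldl_cons, List.foldl_nil, one_mul]
    have h1n : 1 + n = n + 1 := by omega
    have h2n : n + 1 + 1 = n + 2 := rfl
    rw [h1n, h2n]
    unfold pvStepA
    simp only [hgv]
    by_cases hvV : v = "VIDE"
    · -- cell is VIDE: step does nothing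
      rw [if_neg (by simp [hvV])]
      have hfq : (q ++ [v]).filter (fun w => decide (w ≠ "VIDE")) = f := by
        rw [hfq', hvV]; simp
      have hcq : pvCompact (q ++ [v]) = (f ++ List.replicate m "VIDE") ++ ["VIDE"] := by
        rw [pvCompact, hfq]
        have : (q ++ [v]).length - f.length = m + 1 := by simp [hq]; omega
        rw [this, List.replicate_succ']
        simp
      rw [htake, hcq]
      have hcqa : pvCompact q = f ++ List.replicate m "VIDE" := by
        rw [pvCompact, ← hfdef, hq, hmdef]
      rw [Prod.mk.injEq]
      constructor
      · simp [hvV]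
      · rw [decide_eq_decide, hcqa, hvV]
        exact (not_congr (List.append_left_inj _)).symm
    · -- cell is a piece: it falls past the m padding VIDEs
      rw [if_pos (by simpa using hvV)]
      have hdelta : pvDeltaA ((f ++ List.replicate m "VIDE") ++ (v :: col.drop (n+2))) (n+1) = m := by
        have h0 : n + 1 = f.length + m := by omega
        rw [h0]
        exact pvDeltaA_spec f _ m m le_rfl hpf
      rw [hdelta]
      have hfq : (q ++ [v]).filter (fun w => decide (w ≠ "VIDE")) = f ++ [v] := by
        rw [hfq']; simp [hvV]
      have hsub : n + 1 - m = f.length := by omega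
      rw [hsub]
      cases m with
      | zero =>
        -- no gap below: nothing moves
        have hfq2 : f = q := by
          rw [hfdef]
          exact List.filter_eq_self.mpr (List.length_filter_eq_length_iff.mp
            (by rw [← hfdef, hq]; omega))
        rw [if_neg (by omega)]
        rw [List.append_assoc, pv_set_append_length]
        simp only [List.replicate_zero, List.nil_append, List.set_cons_zero]
        rw [htake]
        have hcq : pvCompact (q ++ [v]) = q ++ [v] := by
          rw [pvCompact, hfq, hfq2]
          have : (q ++ [v]).length - (q ++ [v]).length = 0 := by omega
          simp
        have hcq0 : pvCompact q = q := by
          rw [pvCompact, ← hfdef, hfq2]; simp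
        rw [hcq, hcq0]
        simp
        exact hfq2
      | succ k =>
        -- the piece falls k+1 cells and leaves a VIDE behind
        rw [if_pos (by omega)]
        rw [List.append_assoc, pv_set_append_length]
        rw [List.replicate_succ]
        simp only [List.cons_append, List.set_cons_zero]
        have hshape : f ++ (v :: (List.replicate k "VIDE" ++ (v :: col.drop (n+2))))
            = (f ++ v :: List.replicate k "VIDE") ++ (v :: col.drop (n+2)) := by
          simp
        rw [hshape]
        have hplen : (f ++ v :: List.replicate k "VIDE").length = n + 1 := by
          simp; omega
        rw [← hplen, pv_set_append_length, List.set_cons_zero]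
        rw [htake]
        have hcq : pvCompact (q ++ [v]) = (f ++ [v]) ++ List.replicate (k+1) "VIDE" := by
          rw [pvCompact, hfq]
          have : (q ++ [v]).length - (f ++ [v]).length = k + 1 := by simp [hq]; omega
          rw [this]
        rw [Prod.mk.injEq]
        constructor
        · rw [hcq, List.replicate_succ']
          simp
        · have hneq : pvCompact (q ++ [v]) ≠ q ++ [v] := by
            intro heq
            have hg1 : (pvCompact (q ++ [v])).getD (n+1) "" = "VIDE" := by
              rw [hcq]
              have h0 : n + 1 = (f ++ [v]).length + k := by simp; omega
              rw [h0, pv_getD_append_add]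
              rw [List.getD_eq_getElem?_getD]
              simp
            have hg2 : (q ++ [v]).getD (n+1) "" = v := by
              have h0 : n + 1 = q.length + 0 := by omega
              rw [h0, pv_getD_append_add]; rfl
            rw [heq, hg2] at hg1
            exact hvV hg1
          simp [hneq]

-- descenteColonne computes the compacted column and the per-column flag
theorem pvDescCol_eq (col : List String) (H : Nat) (h : H ≤ col.length) :
    pvDescCol col H
      = (pvCompact (col.take H) ++ col.drop H,
         decide (pvCompact (col.take H) ≠ col.take H)) := by
  cases H with
  | zero => simp [pvDescCol, pvCompact]
  | succ n =>
    have := pvInner col n (by omega)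
    simpa [pvDescCol] using this

theorem pv_getD_set_length (g : List (List String)) (x : Nat) (c : List String)
    (hc : c.length = (g.getD x []).length) (i : Nat) :
    ((g.set x c).getD i []).length = (g.getD i []).length := by
  by_cases hxg : x < g.length
  · by_cases hxi : x = i
    · subst hxi
      rw [List.getD_eq_getElem _ _ (by simpa using hxg), List.getElem_set_self,
        List.getD_eq_getElem _ _ hxg]
      rw [List.getD_eq_getElem _ _ hxg] at hc
      exact hc
    · rw [List.getD_eq_getElem?_getD, List.getD_eq_getElem?_getD, List.getElem?_set_ne hxi]
  · rw [List.set_eq_of_length_le (by omega)]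

-- the rebuilt column has the column's length, so the invariant survives one step
theorem pvPreserve (g : List (List String)) (x : Nat) (c : List String)
    (hx : x < g.length)
    (hc : c.length = (g.getD x []).length)
    (hpre : ∀ col ∈ g, (g.getD 0 []).length ≤ col.length) :
    ∀ col ∈ g.set x c, ((g.set x c).getD 0 []).length ≤ col.length := by
  intro d hd
  rw [pv_getD_set_length g x c hc 0]
  rcases List.mem_or_eq_of_mem_set hd with h1 | h2
  · exact hpre _ h1
  · rw [h2, hc]
    refine hpre _ ?_
    rw [List.getD_eq_getElem _ _ hx]
    exact List.getElem_mem hx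

theorem pvFoldEq (xs : List Nat) :
    ∀ (g : List (List String)) (t : Bool),
      (∀ col ∈ g, (g.getD 0 []).length ≤ col.length) →
      (∀ x ∈ xs, x < g.length) →
      xs.foldl pvStepGA (g, t) = xs.foldl pvStepGB (g, t) := by
  induction xs with
  | nil => intro g t _ _; rfl
  | cons x xs ih =>
    intro g t hpre hbnd
    have hx : x < g.length := hbnd x (List.mem_cons_self ..)
    have hmem : g.getD x [] ∈ g := by
      rw [List.getD_eq_getElem _ _ hx]; exact List.getElem_mem hx
    have hH : (g.getD 0 []).length ≤ (g.getD x []).length := hpre _ hmem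
    have htlen : ((g.getD x []).take (g.getD 0 []).length).length = (g.getD 0 []).length := by
      rw [List.length_take]; omega
    have hnew : ((g.getD x []).take (g.getD 0 []).length).filter (fun v => decide (v ≠ "VIDE"))
          ++ List.replicate ((g.getD 0 []).length
              - (((g.getD x []).take (g.getD 0 []).length).filter (fun v => decide (v ≠ "VIDE"))).length) "VIDE"
        = pvCompact ((g.getD x []).take (g.getD 0 []).length) := by
      rw [pvCompact, htlen]
    have hstep : pvStepGA (g, t) x = pvStepGB (g, t) x := by
      unfold pvStepGA pvStepGB
      rw [pvDescCol_eq _ _ hH]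
      simp only [hnew]
      by_cases hc : pvCompact ((g.getD x []).take (g.getD 0 []).length)
          = (g.getD x []).take (g.getD 0 []).length
      · simp
      · simp
    have hclen : (pvCompact ((g.getD x []).take (g.getD 0 []).length)
          ++ (g.getD x []).drop (g.getD 0 []).length).length = (g.getD x []).length := by
      rw [List.length_append, pvCompact_length, htlen, List.length_drop]; omega
    have hB : pvStepGB (g, t) x
        = (g.set x (pvCompact ((g.getD x []).take (g.getD 0 []).length)
              ++ (g.getD x []).drop (g.getD 0 []).length),
           if pvCompact ((g.getD x []).take (g.getD 0 []).length)
                ≠ (g.getD x []).take (g.getD 0 []).length then true else t) := by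
      unfold pvStepGB
      simp only [hnew]
    rw [List.foldl_cons, List.foldl_cons, hstep, hB]
    apply ih
    · exact pvPreserve g x _ hx hclen hpre
    · intro y hy
      rw [List.length_set]
      exact hbnd y (List.mem_cons_of_mem _ hy)

-- ===== VERDICT (by name: the statement is the Claim_ definition above) =====
theorem tassementGrille_spec : Claim_equal_tassementGrille := by
  intro grille _ hpre
  unfold Spec_tassementGrille tassementGrille tassementGrille_alt
  rw [pvFoldEq _ grille false hpre (by intro x hx; simpa using List.mem_range.mp hx)]
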